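-- pv_equiv track=rewrite | github.com/baileyeubanks/system-sync | blaze/services/api/connectors/imessage_connector.py | _is_phone_or_email
-- ===== SOURCE A (Python) =====
-- def _is_phone_or_email(raw: str) -> bool:
--     value = raw.strip()
--     if not value:
--         return False
--     if "@" in value:
--         return True
--     digits = "".join(ch for ch in value if ch.isdigit())
--     return len(digits) >= 10
-- ===== SOURCE B (Python) =====
-- def _is_phone_or_email(raw: str) -> bool:
--     freq = {}
--     for ch in raw.strip():
--         freq[ch] = freq.get(ch, 0) + 1
--     if "@" in freq:
--         return True
--     total = 0
--     for d in "0123456789":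
--         total += freq.get(d, 0)
--     return total >= 10
-- ===== Notes on version B (the rewrite author's own statement) =====
-- stated objective: alternative
-- what changed: B builds a character-frequency dictionary of the stripped string in one pass and then answers both questions from the histogram (a key lookup for '@' and the sum of the ten digit buckets), instead of A's substring membership test plus a digit-filtering join-and-length pass.
import Mathlib
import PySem

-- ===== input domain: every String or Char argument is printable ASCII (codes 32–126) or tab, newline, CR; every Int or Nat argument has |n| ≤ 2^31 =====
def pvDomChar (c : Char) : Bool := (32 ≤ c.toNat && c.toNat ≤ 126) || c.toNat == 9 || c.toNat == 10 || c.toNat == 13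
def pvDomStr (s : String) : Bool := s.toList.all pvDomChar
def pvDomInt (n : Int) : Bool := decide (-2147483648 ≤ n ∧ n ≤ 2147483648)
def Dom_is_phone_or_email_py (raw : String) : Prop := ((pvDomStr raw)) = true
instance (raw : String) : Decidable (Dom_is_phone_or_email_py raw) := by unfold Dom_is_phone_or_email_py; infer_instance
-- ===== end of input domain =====

-- ===== PORT A =====
-- B answers both questions from a one-pass character histogram (dict) instead of A's
-- substring membership test plus digit-filter/join/len pass; objective: alternative.
def is_phone_or_email_py (raw : String) : Bool :=
  let value := PySem.Str.strip raw
  if PySem.Str.len value == 0 then false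
  else if PySem.Str.isIn "@" value then true
  else
    let digits := String.ofList (value.toList.filter PySem.Chars.isdigit)  -- "".join(ch for ch in value if ch.isdigit())
    PySem.Str.len digits ≥ 10

-- ===== PORT B =====
def is_phone_or_email_py_alt (raw : String) : Bool :=
  let freq := (PySem.Str.strip raw).toList.foldl
      (fun d ch => d.insert ch (d.getD ch 0 + 1)) PySem.Dict.empty   -- freq[ch] = freq.get(ch, 0) + 1
  if freq.contains '@' then true                                     -- "@" in freq
  else
    let total := ("0123456789".toList).foldl (fun acc d => acc + freq.getD d (0 : Int)) (0 : Int)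
    decide ((10 : Int) ≤ total)

-- ===== PRECONDITION & SPEC =====
def Spec_is_phone_or_email_py (raw : String) (out : Bool) : Prop := out = is_phone_or_email_py_alt raw
instance (raw : String) (out : Bool) : Decidable (Spec_is_phone_or_email_py raw out) := by unfold Spec_is_phone_or_email_py; infer_instance

-- ===== CLAIM (what is proved, stated in full; the proofs are below) =====
def Claim_equal_is_phone_or_email_py : Prop := ∀ (raw : String), Dom_is_phone_or_email_py raw → Spec_is_phone_or_email_py raw (is_phone_or_email_py raw)

-- ===== LEMMAS AND PROOFS =====
theorem isdigit_iff_mem (c : Char) :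
    PySem.Chars.isdigit c = true ↔ c ∈ ['0','1','2','3','4','5','6','7','8','9'] := by
  simp only [PySem.Chars.isdigit, Bool.and_eq_true, decide_eq_true_eq, List.mem_cons,
    List.not_mem_nil, or_false]
  constructor
  · rintro ⟨h1, h2⟩
    have h1' : 48 ≤ c.toNat := h1
    have h2' : c.toNat ≤ 57 := h2
    have hc : Char.ofNat c.toNat = c := Char.ofNat_toNat c
    rw [← hc]
    have : c.toNat = 48 ∨ c.toNat = 49 ∨ c.toNat = 50 ∨ c.toNat = 51 ∨ c.toNat = 52 ∨
           c.toNat = 53 ∨ c.toNat = 54 ∨ c.toNat = 55 ∨ c.toNat = 56 ∨ c.toNat = 57 := by omega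
    rcases this with h|h|h|h|h|h|h|h|h|h <;> rw [h] <;> decide
  · rintro (h|h|h|h|h|h|h|h|h|h) <;> subst h <;> exact ⟨by decide, by decide⟩

theorem sum_digit_counts (cs : List Char) :
    (['0','1','2','3','4','5','6','7','8','9'].map (fun d => cs.count d)).sum
      = cs.countP PySem.Chars.isdigit := by
  induction cs with
  | nil => decide
  | cons c cs ih =>
    simp only [List.count_cons, List.countP_cons, List.map_cons, List.map_nil, List.sum_cons,
      List.sum_nil] at ih ⊢
    by_cases h : PySem.Chars.isdigit c = true
    · have hm := (isdigit_iff_mem c).mp h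
      simp only [List.mem_cons, List.not_mem_nil, or_false] at hm
      rcases hm with h'|h'|h'|h'|h'|h'|h'|h'|h'|h'
      all_goals (subst h'; simp [h]; omega)
    · have hm : c ∉ ['0','1','2','3','4','5','6','7','8','9'] := fun hmem =>
        h ((isdigit_iff_mem c).mpr hmem)
      simp only [List.mem_cons, List.not_mem_nil, or_false, not_or] at hm
      obtain ⟨h0,h1,h2,h3,h4,h5,h6,h7,h8,h9⟩ := hm
      simp only [h, beq_iff_eq]
      rw [if_neg h0, if_neg h1, if_neg h2, if_neg h3, if_neg h4, if_neg h5, if_neg h6,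
          if_neg h7, if_neg h8, if_neg h9]
      norm_num
      omega

theorem isIn_at_iff (cs : List Char) : PySem.Chars.isIn "@".toList cs = true ↔ '@' ∈ cs := by
  have h1 : "@".toList = ['@'] := rfl
  rw [h1, PySem.Chars.isIn_iff_infix]
  constructor
  · intro h; exact h.subset (by simp)
  · intro h
    obtain ⟨l, r, hlr⟩ := List.mem_iff_append.mp h
    exact ⟨l, r, by simp [← hlr]⟩

theorem toList_ofList (cs : List Char) : (String.ofList cs).toList = cs :=
  (String.ofList_eq (s := String.ofList cs)).mp rfl |>.symm

theorem A_eq (s : String) :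
    is_phone_or_email_py s =
      (if (PySem.Str.strip s).toList = [] then false
       else if '@' ∈ (PySem.Str.strip s).toList then true
       else decide (10 ≤ (PySem.Str.strip s).toList.countP PySem.Chars.isdigit)) := by
  unfold is_phone_or_email_py
  simp only [PySem.Str.len_eq, PySem.Str.isIn, toList_ofList, ge_iff_le]
  by_cases hempty : (PySem.Str.strip s).toList = []
  · simp [hempty]
  · have hlen : ¬ ((((PySem.Str.strip s).toList.length : Int)) == 0) = true := by
      simp only [beq_iff_eq, Nat.cast_eq_zero]
      exact fun h => hempty (List.length_eq_zero_iff.mp h)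
    rw [if_neg hlen, if_neg hempty]
    by_cases hat : '@' ∈ (PySem.Str.strip s).toList
    · rw [if_pos ((isIn_at_iff _).mpr hat), if_pos hat]
    · rw [if_neg (fun h => hat ((isIn_at_iff _).mp h)), if_neg hat,
          List.countP_eq_length_filter, decide_eq_decide]
      exact ⟨fun h => by exact_mod_cast h, fun h => by exact_mod_cast h⟩

theorem B_eq (s : String) :
    is_phone_or_email_py_alt s =
      (if '@' ∈ (PySem.Str.strip s).toList then true
       else decide (10 ≤ (PySem.Str.strip s).toList.countP PySem.Chars.isdigit)) := by
  unfold is_phone_or_email_py_alt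
  simp only [PySem.Dict.foldl_insert_getD_add_one_eq_counter, PySem.Dict.contains_counter,
    PySem.Dict.getD_counter]
  by_cases hat : '@' ∈ (PySem.Str.strip s).toList
  · rw [if_pos (by simpa using hat), if_pos hat]
  · rw [if_neg (by simpa using hat), if_neg hat]
    have hsum := sum_digit_counts (PySem.Str.strip s).toList
    simp only [show "0123456789".toList = ['0','1','2','3','4','5','6','7','8','9'] from by decide,
      List.foldl_cons, List.foldl_nil]
    simp only [List.map_cons, List.map_nil, List.sum_cons, List.sum_nil] at hsum
    rw [decide_eq_decide]
    omega

-- ===== VERDICT (by name: the statement is the Claim_ definition above) =====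
theorem is_phone_or_email_py_spec : Claim_equal_is_phone_or_email_py := by
  intro raw _
  unfold Spec_is_phone_or_email_py
  rw [A_eq, B_eq]
  by_cases h : (PySem.Str.strip raw).toList = []
  · simp [h]
  · rw [if_neg h]
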